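-- pv_equiv track=rewrite | github.com/aquablue1/dns_probe | src/paint/AdvancedPlot.py | _getBreakList
-- ===== SOURCE A (Python) =====
-- def _getBreakList(dataList):
--     breakList = []
--     isZero = True if dataList[0] == 0 else False
--     for i in range(1, len(dataList)):
--         if isZero and dataList[i] != 0:
--             breakList.append(i-1)
--             isZero = False
--         elif not isZero and dataList[i] == 0:
--             breakList.append(i-1)
--             isZero = True
--     breakList.append(len(dataList)-1)
--     return breakList
-- ===== SOURCE B (Python) =====
-- def _getBreakList(dataList):
--     # Run-grouping: walk maximal runs of equal zero-ness, recording each run's last index.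
--     breakList = []
--     pos = 0
--     rest = dataList
--     while rest:
--         z = rest[0] == 0
--         i = 1
--         while i < len(rest) and (rest[i] == 0) == z:
--             i += 1
--         pos += i
--         breakList.append(pos - 1)
--         rest = rest[i:]
--     return breakList
-- ===== Notes on version B (the rewrite author's own statement) =====
-- stated objective: alternative
-- what changed: Replaces A's stateful zero/non-zero transition scan over indices with a run-grouping traversal that consumes one maximal run of equal zero-ness at a time and records each run's last index.
import Mathlib
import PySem

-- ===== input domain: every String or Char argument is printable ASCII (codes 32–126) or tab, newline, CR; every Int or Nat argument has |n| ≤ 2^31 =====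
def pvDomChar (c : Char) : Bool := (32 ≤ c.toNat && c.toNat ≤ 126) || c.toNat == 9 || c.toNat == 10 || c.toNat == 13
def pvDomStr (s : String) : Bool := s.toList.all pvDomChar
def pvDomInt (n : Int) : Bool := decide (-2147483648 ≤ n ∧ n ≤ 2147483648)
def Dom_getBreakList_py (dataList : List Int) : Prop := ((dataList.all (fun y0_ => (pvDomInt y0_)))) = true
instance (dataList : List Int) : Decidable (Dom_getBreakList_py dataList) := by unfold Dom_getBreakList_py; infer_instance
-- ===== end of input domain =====

-- B replaces A's stateful transition scan with a run-grouping traversal (same cost); return values only.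

-- ===== PORT A =====
-- the first-element read is ported through pyGetD with default 0: the empty list (where
-- Python raises IndexError) is excluded by Pre_getBreakList_py, so the default is never observed.
def getBreakList_py (dataList : List Int) : List Int :=
  let isZero : Bool := if PySem.List.pyGetD dataList 0 0 == 0 then true else false
  let st := (PySem.List.pyRange 1 ((dataList.length : Int)) 1).foldl
    (fun (st : List Int × Bool) i =>
      if st.2 && !(PySem.List.pyGetD dataList i 0 == 0) then (st.1 ++ [i - 1], false)
      else if !st.2 && (PySem.List.pyGetD dataList i 0 == 0) then (st.1 ++ [i - 1], true)
      else st) ([], isZero)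
  st.1 ++ [((dataList.length : Int)) - 1]

-- ===== PORT B =====
-- the outer while loop of Source B: consume one maximal run of equal zero-ness per step;
-- the inner counting loop is the takeWhile length.  The Nat argument is fuel (one unit
-- per outer iteration, length is always enough) so the recursion is structural.
def getBreakListAltGo : Nat → List Int → Int → List Int
  | _, [], _ => []
  | 0, _ :: _, _ => []
  | fuel + 1, x :: xs, pos =>
    let z : Bool := x == 0
    let i : Int := 1 + ((xs.takeWhile (fun y => (y == 0) == z)).length : Int)
    (pos + i - 1) :: getBreakListAltGo fuel (xs.dropWhile (fun y => (y == 0) == z)) (pos + i)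

def getBreakList_py_alt (dataList : List Int) : List Int :=
  getBreakListAltGo dataList.length dataList 0

-- ===== PRECONDITION & SPEC =====
-- Pre_ excludes only the empty list, on which A raises IndexError reading the first element.
def Pre_getBreakList_py (dataList : List Int) : Prop := dataList ≠ []
instance (dataList : List Int) : Decidable (Pre_getBreakList_py dataList) := by
  unfold Pre_getBreakList_py; infer_instance

def pvWitness_getBreakList_py : List Int := [0, 3, 0]

def Spec_getBreakList_py (dataList : List Int) (out : List Int) : Prop :=
  out = getBreakList_py_alt dataList
instance (dataList : List Int) (out : List Int) : Decidable (Spec_getBreakList_py dataList out) := by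
  unfold Spec_getBreakList_py; infer_instance

-- ===== CLAIM (what is proved, stated in full; the proofs are below) =====
def Claim_equal_getBreakList_py : Prop := ∀ (dataList : List Int), Dom_getBreakList_py dataList → Pre_getBreakList_py dataList → Spec_getBreakList_py dataList (getBreakList_py dataList)

-- ===== LEMMAS AND PROOFS =====

-- A's loop, re-expressed as structural recursion over the suffix of the list it scans.
def fA : List Int → Bool → Int → List Int
  | [], _, _ => []
  | y :: ys, z, i =>
    if z && !(y == 0) then (i - 1) :: fA ys false (i + 1)
    else if !z && (y == 0) then (i - 1) :: fA ys true (i + 1)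
    else fA ys z (i + 1)

lemma foldA (dl : List Int) (k : Nat) : ∀ (j : Nat), dl.length = j + k → ∀ (acc : List Int) (z : Bool),
    ((PySem.List.pyRange (j : Int) ((dl.length : Int)) 1).foldl
      (fun (st : List Int × Bool) i =>
        if st.2 && !(PySem.List.pyGetD dl i 0 == 0) then (st.1 ++ [i - 1], false)
        else if !st.2 && (PySem.List.pyGetD dl i 0 == 0) then (st.1 ++ [i - 1], true)
        else st) (acc, z)).1
      = acc ++ fA (dl.drop j) z (j : Int) := by
  induction k with
  | zero =>
    intro j hj acc z
    rw [PySem.List.pyRange_one_eq_nil (by exact_mod_cast (by omega : dl.length ≤ j))]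
    rw [List.drop_eq_nil_of_le (by omega)]
    simp [fA]
  | succ k ih =>
    intro j hj acc z
    have hjl : j < dl.length := by omega
    have hd : dl.drop j = dl[j] :: dl.drop (j + 1) := (List.getElem_cons_drop hjl).symm
    have hget : PySem.List.pyGetD dl (j : Int) 0 = dl[j] := by
      rw [PySem.List.pyGetD_natCast]; exact List.getD_eq_getElem dl 0 hjl
    have hih := fun acc' z' => ih (j + 1) (by omega) acc' z'
    have hc : ((j + 1 : Nat) : Int) = (j : Int) + 1 := by push_cast; ring
    rw [hc] at hih
    rw [PySem.List.pyRange_one_cons (by exact_mod_cast hjl), List.foldl_cons, hd]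
    cases z with
    | true =>
      by_cases h : dl[j] = 0
      · simp only [hget, h]
        simp only [beq_self_eq_true, Bool.not_true, Bool.and_false, Bool.false_eq_true,
          if_false, Bool.not_true, Bool.false_and]
        rw [hih acc true]
        simp [fA]
      · have hb : (dl[j] == 0) = false := by simp [h]
        simp only [hget, hb, Bool.not_false, Bool.and_true, if_true]
        rw [hih (acc ++ [(j : Int) - 1]) false]
        simp [fA, hb]
    | false =>
      by_cases h : dl[j] = 0
      · simp only [hget, h, beq_self_eq_true, Bool.not_true, Bool.false_and,
          Bool.false_eq_true, if_false, Bool.not_false, Bool.true_and, if_true]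
        rw [hih (acc ++ [(j : Int) - 1]) true]
        simp [fA]
      · have hb : (dl[j] == 0) = false := by simp [h]
        simp only [hget, hb, Bool.false_and, Bool.false_eq_true, if_false,
          Bool.not_false, Bool.true_and]
        rw [hih acc false]
        simp [fA, hb]

-- merging two adjacent elements of equal zero-ness into one run
lemma altGo_merge (fuel : Nat) (x y : Int) (ys : List Int) (pos : Int)
    (h : (x == 0) = (y == 0)) :
    getBreakListAltGo (fuel + 1) (x :: y :: ys) pos
      = getBreakListAltGo (fuel + 1) (y :: ys) (pos + 1) := by
  rw [getBreakListAltGo, getBreakListAltGo, h]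
  simp only [List.takeWhile_cons, List.dropWhile_cons, beq_self_eq_true, if_true,
    List.length_cons]
  have e : pos + (1 + ((List.takeWhile (fun w => (w == 0) == (y == 0)) ys).length + 1 : Nat)) =
      pos + 1 + (1 + ((List.takeWhile (fun w => (w == 0) == (y == 0)) ys).length : Nat)) := by
    push_cast; ring
  rw [e]

lemma altGo_eq_fA : ∀ (xs : List Int) (fuel : Nat), xs.length ≤ fuel → ∀ (x pos : Int),
    getBreakListAltGo (fuel + 1) (x :: xs) pos
      = fA xs (x == 0) (pos + 1) ++ [pos + 1 + (xs.length : Int) - 1] := by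
  intro xs
  induction xs with
  | nil =>
    intro fuel _ x pos
    cases fuel <;> simp [getBreakListAltGo, fA]
  | cons y ys ih =>
    intro fuel hfuel x pos
    match fuel, hfuel with
    | f + 1, hfuel =>
      by_cases h : (y == 0) = (x == 0)
      · rw [altGo_merge (f + 1) x y ys pos h.symm,
          ih (f + 1) (by simpa using (Nat.le_of_succ_le_succ hfuel).trans (Nat.le_succ f)) y (pos + 1)]
        have hy : (y == 0) = (x == 0) := h
        have hfa : fA (y :: ys) (x == 0) (pos + 1) = fA ys (x == 0) (pos + 1 + 1) := by
          cases hx : (x == 0) <;> rw [hx] at hy <;> simp [fA, hy]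
        rw [hfa, h]
        have e : pos + 1 + 1 + (ys.length : Int) - 1 = pos + 1 + (((y :: ys).length : Nat) : Int) - 1 := by
          simp only [List.length_cons]; push_cast; ring
        rw [e]
      · rw [getBreakListAltGo]
        have hpy : ((y == 0) == (x == 0)) = false := by
          cases hx : (x == 0) <;> rw [hx] at h <;> simp_all
        simp only [List.takeWhile_cons, List.dropWhile_cons, hpy, Bool.false_eq_true,
          if_false, List.length_nil]
        rw [ih f (Nat.le_of_succ_le_succ hfuel) y (pos + (1 + ((0 : Nat) : Int)))]
        have hfa : fA (y :: ys) (x == 0) (pos + 1)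
            = (pos + 1 - 1) :: fA ys (y == 0) (pos + 1 + 1) := by
          cases hx : (x == 0)
          · have hy : (y == 0) = true := by rw [hx] at hpy; simpa using hpy
            simp [fA, hy]
          · have hy : (y == 0) = false := by rw [hx] at hpy; simpa using hpy
            simp [fA, hy]
        rw [hfa]
        simp only [List.cons_append, List.length_cons]
        have e0 : pos + (1 + ((0 : Nat) : Int)) = pos + 1 := by push_cast; ring
        rw [e0]
        have e : pos + 1 + 1 + (ys.length : Int) - 1 = pos + 1 + ((ys.length + 1 : Nat) : Int) - 1 := by
          push_cast; ring
        rw [e]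

-- ===== VERDICT (by name: the statement is the Claim_ definition above) =====
theorem getBreakList_py_spec : Claim_equal_getBreakList_py := by
  intro dataList _ hpre
  unfold Spec_getBreakList_py getBreakList_py getBreakList_py_alt
  match dataList, hpre with
  | x :: xs, _ =>
    have h0 : PySem.List.pyGetD (x :: xs) 0 0 = x := by
      simp [PySem.List.pyGetD_natCast]
    have hz : (if (x == 0) = true then true else false) = (x == 0) := by
      cases (x == 0) <;> simp
    have hfold := foldA (x :: xs) xs.length 1 (by simp; omega) [] (x == 0)
    simp only [List.drop_one, List.tail_cons, Int.natCast_one] at hfold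
    simp only [h0, hz]
    rw [hfold]
    have halt : getBreakListAltGo (x :: xs).length (x :: xs) 0
        = fA xs (x == 0) (0 + 1) ++ [0 + 1 + (xs.length : Int) - 1] :=
      altGo_eq_fA xs xs.length le_rfl x 0
    rw [halt]
    simp only [List.nil_append]
    have e2 : (((x :: xs).length : Nat) : Int) - 1 = 1 + (xs.length : Int) - 1 := by
      simp only [List.length_cons]; push_cast; ring
    rw [e2]
    norm_num
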